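-- pv_equiv track=rewrite | github.com/becktepe/neps | neps/search_spaces/architecture/cfg_api.py | _dict_structure_to_str
-- ===== SOURCE A (Python) =====
-- def _dict_structure_to_str(
--     structure: dict, primitives: str
-- ) -> str:
--     def _save_replace(string: str, _old: str, _new: str):
--         while string.count(_old) > 0:
--             string = string.replace(_old, _new)
--         return string
--
--     grammar = ""
--     for nonterminal, productions in structure.items():
--         grammar += nonterminal + " -> " + " | ".join(productions) + "\n"
--     grammar = grammar.replace("(", " ")
--     grammar = grammar.replace(")", "")
--     grammar = grammar.replace(",", "")
--     for primitive in primitives: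
--         grammar = _save_replace(grammar, f" {primitive} ", f' "{primitive}" ')
--         grammar = _save_replace(grammar, f" {primitive}\n", f' "{primitive}"\n')
--     return grammar
-- ===== SOURCE B (Python) =====
-- def _dict_structure_to_str(structure: dict, primitives: str) -> str:
--     grammar = "".join(
--         nonterminal + " -> " + " | ".join(productions) + "\n"
--         for nonterminal, productions in structure.items()
--     )
--     grammar = grammar.replace("(", " ").replace(")", "").replace(",", "")
--     for primitive in primitives:
--         pieces = []
--         prev_space = False
--         n = len(grammar)
--         for i in range(n):
--             ch = grammar[i]
--             if prev_space and ch == primitive and i + 1 < n and grammar[i + 1] in (" ", "\n"):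
--                 pieces.append('"' + ch + '"')
--             else:
--                 pieces.append(ch)
--             prev_space = ch == " "
--         grammar = "".join(pieces)
--     return grammar
-- ===== Notes on version B (the rewrite author's own statement) =====
-- stated objective: alternative
-- what changed: The repeated str.count/str.replace fixpoint loop per primitive is replaced by a single left-to-right zero-width scan per primitive that quotes a character exactly when it is preceded by a space and followed by a space or newline; Pre_ excludes primitives containing a space character, where A's fixpoint output on runs of spaces depends accidentally on the order in which str.replace consumes overlapping occurrences.
-- outside the precondition, e.g. on _dict_structure_to_str({'S': ['a    b']}, ' '): A returns 'S -> a " "  b\n', B returns 'S -> a " "" " b\n'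
import Mathlib
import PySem

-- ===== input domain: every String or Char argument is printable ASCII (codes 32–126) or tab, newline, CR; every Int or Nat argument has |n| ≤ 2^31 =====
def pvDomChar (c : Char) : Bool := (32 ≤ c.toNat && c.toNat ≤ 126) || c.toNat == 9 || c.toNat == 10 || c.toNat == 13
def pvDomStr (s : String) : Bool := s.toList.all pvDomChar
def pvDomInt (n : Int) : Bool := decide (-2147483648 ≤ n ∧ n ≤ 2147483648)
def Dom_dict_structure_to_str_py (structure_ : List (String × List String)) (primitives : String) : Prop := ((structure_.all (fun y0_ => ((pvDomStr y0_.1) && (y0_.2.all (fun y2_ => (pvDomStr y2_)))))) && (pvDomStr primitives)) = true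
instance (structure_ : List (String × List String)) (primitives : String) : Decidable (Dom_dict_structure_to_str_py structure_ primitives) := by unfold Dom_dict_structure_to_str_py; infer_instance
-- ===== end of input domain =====

-- B replaces A's per-primitive `while count>0: replace` fixpoint by one zero-width scan per
-- primitive (quote a primitive char iff preceded by ' ' and followed by ' ' or '\n'); equal on
-- primitives without a space character (Pre_), where A's overlap consumption order is accidental.

-- ===== PORT A =====
-- Python's `while string.count(_old) > 0: string = string.replace(_old, _new)`; the fuel
-- argument only makes the recursion total (callers pass length + 1, proved sufficient on Pre_).
def pvSaveReplace (fuel : Nat) (s old new : List Char) : List Char :=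
  match fuel with
  | 0 => s
  | fuel + 1 =>
      if PySem.Chars.count s old > 0 then
        pvSaveReplace fuel (PySem.Chars.replace s old new) old new
      else s

def dict_structure_to_str_py (structure_ : List (String × List String)) (primitives : String) : String :=
  let grammar : List Char := ((PySem.Dict.ofList structure_).items).foldl
    (fun acc p =>
      acc ++ p.1.toList ++ (" -> ".toList)
          ++ PySem.Chars.join (" | ".toList) (p.2.map String.toList) ++ ['\n']) []
  let grammar := PySem.Chars.replace grammar ['('] [' ']
  let grammar := PySem.Chars.replace grammar [')'] []
  let grammar := PySem.Chars.replace grammar [','] []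
  let grammar := primitives.toList.foldl (fun g c =>
    let g := pvSaveReplace (g.length + 1) g [' ', c, ' '] [' ', '"', c, '"', ' ']
    pvSaveReplace (g.length + 1) g [' ', c, '\n'] [' ', '"', c, '"', '\n']) grammar
  String.ofList grammar

-- ===== PORT B =====
-- single pass with a carried prev-is-space flag and one-character lookahead
def pvQuoteScan (primitive : Char) : Bool → List Char → List Char
  | _, [] => []
  | prevSpace, ch :: rest =>
      (if prevSpace && ch == primitive
          && (rest.head? == some ' ' || rest.head? == some '\n')
       then ['"', ch, '"'] else [ch]) ++ pvQuoteScan primitive (ch == ' ') rest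

def dict_structure_to_str_py_alt (structure_ : List (String × List String)) (primitives : String) : String :=
  let grammar : List Char := PySem.Chars.join []
    (((PySem.Dict.ofList structure_).items).map
      (fun p => p.1.toList ++ (" -> ".toList)
          ++ PySem.Chars.join (" | ".toList) (p.2.map String.toList) ++ ['\n']))
  let grammar := PySem.Chars.replace
    (PySem.Chars.replace (PySem.Chars.replace grammar ['('] [' ']) [')'] []) [','] []
  String.ofList (primitives.toList.foldl (fun g c => pvQuoteScan c false g) grammar)

-- ===== PRECONDITION & SPEC =====
-- Pre_ excludes primitives containing a space character: there A still returns, but its value on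
-- runs of spaces is an accident of str.replace's non-overlapping consumption order.
def Pre_dict_structure_to_str_py (structure_ : List (String × List String)) (primitives : String) : Prop :=
  (primitives.toList.all (fun c => !(c == ' '))) = true
instance (structure_ : List (String × List String)) (primitives : String) : Decidable (Pre_dict_structure_to_str_py structure_ primitives) := by unfold Pre_dict_structure_to_str_py; infer_instance

def pvWitness_dict_structure_to_str_py : (List (String × List String)) × String :=
  ([("S", ["a b"])], "ab")

def Spec_dict_structure_to_str_py (structure_ : List (String × List String)) (primitives : String) (out : String) : Prop := out = dict_structure_to_str_py_alt structure_ primitives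
instance (structure_ : List (String × List String)) (primitives : String) (out : String) : Decidable (Spec_dict_structure_to_str_py structure_ primitives out) := by unfold Spec_dict_structure_to_str_py; infer_instance

-- ===== CLAIM (what is proved, stated in full; the proofs are below) =====
def Claim_equal_dict_structure_to_str_py : Prop := ∀ (structure_ : List (String × List String)) (primitives : String), Dom_dict_structure_to_str_py structure_ primitives → Pre_dict_structure_to_str_py structure_ primitives → Spec_dict_structure_to_str_py structure_ primitives (dict_structure_to_str_py structure_ primitives)

-- ===== LEMMAS AND PROOFS =====

-- one non-overlapping left-to-right replace pass of ' c d' by ' "c"d' (what str.replace does)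
def pvRep (c d : Char) : List Char → List Char
  | [] => []
  | x :: t =>
      if x = ' ' ∧ t.take 2 = [c, d]
      then ' ' :: '"' :: c :: '"' :: d :: pvRep c d (t.drop 2)
      else x :: pvRep c d t
  termination_by l => l.length
  decreasing_by all_goals (simp; try omega)

-- what str.count counts: non-overlapping occurrences, scanning left to right
def pvCnt (c d : Char) : List Char → Nat
  | [] => 0
  | x :: t =>
      if x = ' ' ∧ t.take 2 = [c, d]
      then 1 + pvCnt c d (t.drop 2)
      else pvCnt c d t
  termination_by l => l.length
  decreasing_by all_goals (simp; try omega)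

-- number of (possibly overlapping) occurrence positions: the termination measure
def pvOcc (c d : Char) : List Char → Nat
  | [] => 0
  | x :: t => (if x = ' ' ∧ t.take 2 = [c, d] then 1 else 0) + pvOcc c d t

-- zero-width quoting pass for a single pattern ' c d'
def pvZw (c d : Char) : Bool → List Char → List Char
  | _, [] => []
  | p, x :: t =>
      (if p = true ∧ x = c ∧ t.head? = some d then ['"', x, '"'] else [x])
        ++ pvZw c d (x == ' ') t

theorem pv_isPrefixOf_iff (c d x : Char) (t : List Char) :
    ([' ', c, d].isPrefixOf (x :: t) = true) ↔ (x = ' ' ∧ t.take 2 = [c, d]) := by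
  rw [List.isPrefixOf_iff_prefix, List.cons_prefix_cons]
  rw [List.prefix_iff_eq_take]
  constructor
  · rintro ⟨h1, h2⟩; exact ⟨h1.symm, by simpa using h2.symm⟩
  · rintro ⟨h1, h2⟩; exact ⟨h1.symm, by simpa using h2.symm⟩

theorem pv_count_go_eq (c d : Char) :
    ∀ (fuel : Nat) (l : List Char) (acc : Nat), l.length ≤ fuel →
      PySem.Chars.count.go [' ', c, d] fuel l acc = acc + pvCnt c d l := by
  intro fuel
  induction fuel with
  | zero =>
      intro l acc h
      have hl : l = [] := by cases l <;> simp_all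
      subst hl
      simp [PySem.Chars.count.go, pvCnt]
  | succ n ih =>
      intro l acc h
      cases l with
      | nil => simp [PySem.Chars.count.go, pvCnt]
      | cons x t =>
          rw [PySem.Chars.count.go]
          by_cases hp : [' ', c, d].isPrefixOf (x :: t) = true
          · rw [if_pos hp]
            have hdrop : (x :: t).drop [' ', c, d].length = t.drop 2 := by
              simp [List.drop_succ_cons]
            rw [hdrop, ih (t.drop 2) (acc + 1) (by simp at h ⊢; omega)]
            rw [pvCnt, if_pos ((pv_isPrefixOf_iff c d x t).mp hp)]
            omega
          · rw [if_neg hp, ih t acc (by simp at h ⊢; omega)]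
            rw [pvCnt, if_neg (fun hh => hp ((pv_isPrefixOf_iff c d x t).mpr hh))]

theorem pv_count_eq (c d : Char) (l : List Char) :
    PySem.Chars.count l [' ', c, d] = pvCnt c d l := by
  rw [PySem.Chars.count]
  rw [if_neg (by simp)]
  simpa using pv_count_go_eq c d l.length l 0 le_rfl

theorem pv_replace_go_eq (c d : Char) :
    ∀ (fuel : Nat) (l acc : List Char), l.length ≤ fuel →
      PySem.Chars.replace.go [' ', c, d] [' ', '"', c, '"', d] fuel l acc
        = acc.reverse ++ pvRep c d l := by
  intro fuel
  induction fuel with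
  | zero =>
      intro l acc h
      have hl : l = [] := by cases l <;> simp_all
      subst hl
      simp [PySem.Chars.replace.go, pvRep]
  | succ n ih =>
      intro l acc h
      cases l with
      | nil => simp [PySem.Chars.replace.go, pvRep]
      | cons x t =>
          rw [PySem.Chars.replace.go]
          by_cases hp : [' ', c, d].isPrefixOf (x :: t) = true
          · rw [if_pos hp]
            have hdrop : (x :: t).drop [' ', c, d].length = t.drop 2 := by
              simp [List.drop_succ_cons]
            rw [hdrop, ih (t.drop 2) ([' ', '"', c, '"', d].reverse ++ acc) (by simp at h ⊢; omega)]
            rw [pvRep, if_pos ((pv_isPrefixOf_iff c d x t).mp hp)]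
            simp
          · rw [if_neg hp, ih t (x :: acc) (by simp at h ⊢; omega)]
            rw [pvRep, if_neg (fun hh => hp ((pv_isPrefixOf_iff c d x t).mpr hh))]
            simp

theorem pv_replace_eq (c d : Char) (l : List Char) :
    PySem.Chars.replace l [' ', c, d] [' ', '"', c, '"', d] = pvRep c d l := by
  rw [PySem.Chars.replace]
  rw [if_neg (by simp)]
  simpa using pv_replace_go_eq c d l.length l [] le_rfl

theorem pv_rep_head (c d : Char) (t : List Char) : (pvRep c d t).head? = t.head? := by
  cases t with
  | nil => simp [pvRep]
  | cons x u =>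
      rw [pvRep]
      split
      · rename_i h; simp [h.1]
      · simp

theorem pv_rep_take2 (c d : Char) (hc : c ≠ ' ') (t : List Char) :
    (pvRep c d t).take 2 = [c, d] ↔ t.take 2 = [c, d] := by
  have hc' : ¬ (' ' = c) := fun e => hc e.symm
  cases t with
  | nil => simp [pvRep]
  | cons x u =>
      rw [pvRep]
      split
      · rename_i h
        simp [h.1, hc']
      · rename_i h
        simp only [List.take_succ_cons, List.cons.injEq]
        rw [List.take_one, List.take_one, pv_rep_head]

theorem pv_take2_decomp {c d : Char} {t : List Char} (h : t.take 2 = [c, d]) :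
    t = c :: d :: t.drop 2 := by
  cases t with
  | nil => simp at h
  | cons a u =>
      cases u with
      | nil => simp at h
      | cons b v =>
          simp only [List.take_succ_cons, List.take_zero, List.cons.injEq, List.take_cons] at h
          simp_all

theorem pv_occ_cons_of_neg (c d a : Char) (rest : List Char)
    (h : ¬ (a = ' ' ∧ rest.take 2 = [c, d])) :
    pvOcc c d (a :: rest) = pvOcc c d rest := by
  simp only [pvOcc, if_neg h, Nat.zero_add]

theorem pv_occ_rep (c d : Char) (hc : c ≠ ' ') (hd : d ≠ '"') (l : List Char) :
    pvOcc c d (pvRep c d l) + (if pvCnt c d l = 0 then 0 else 1) ≤ pvOcc c d l := by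
  fun_induction pvRep c d l with
  | case1 => simp [pvOcc, pvCnt]
  | case2 x t hcond ih =>
      obtain ⟨hx, ht2⟩ := hcond
      subst hx
      have hu : t = c :: d :: t.drop 2 := pv_take2_decomp ht2
      have hcnd : (' ' = ' ' ∧ List.take 2 t = [c, d]) := ⟨rfl, ht2⟩
      rw [pvCnt, if_pos hcnd]
      conv_rhs => rw [hu]
      have hL : pvOcc c d (' ' :: '"' :: c :: '"' :: d :: pvRep c d (t.drop 2))
          = (if d = ' ' ∧ (pvRep c d (t.drop 2)).take 2 = [c, d] then 1 else 0)
              + pvOcc c d (pvRep c d (t.drop 2)) := by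
        rw [pv_occ_cons_of_neg c d ' ' _ (by
          rintro ⟨-, h2⟩
          simp only [List.take_succ_cons, List.take_zero, List.cons.injEq, and_true] at h2
          exact hd (h2.2.symm.trans h2.1.symm))]
        rw [pv_occ_cons_of_neg c d '"' _ (fun hh => (by decide : ('"' : Char) ≠ ' ') hh.1)]
        rw [pv_occ_cons_of_neg c d c _ (fun hh => hc hh.1)]
        rw [pv_occ_cons_of_neg c d '"' _ (fun hh => (by decide : ('"' : Char) ≠ ' ') hh.1)]
        simp only [pvOcc]
      have hR : pvOcc c d (' ' :: c :: d :: t.drop 2)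
          = 1 + ((if d = ' ' ∧ (t.drop 2).take 2 = [c, d] then 1 else 0)
              + pvOcc c d (t.drop 2)) := by
        simp only [pvOcc]
        rw [if_pos (show True ∧ List.take 2 (c :: d :: t.drop 2) = [c, d] from ⟨trivial, by simp⟩),
          if_neg (fun hh => hc hh.1)]
        omega
      have hδ : (if d = ' ' ∧ (pvRep c d (t.drop 2)).take 2 = [c, d] then 1 else 0)
          = (if d = ' ' ∧ (t.drop 2).take 2 = [c, d] then 1 else 0) := by
        by_cases hds : d = ' '
        · subst hds; simp only [pv_rep_take2 c ' ' hc]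
        · simp [hds]
      rw [hL, hR, hδ]
      rw [if_neg (show ¬ (1 + pvCnt c d (t.drop 2) = 0) from by omega)]
      omega
  | case3 x t hcond ih =>
      rw [pvCnt, if_neg hcond]
      have hL : pvOcc c d (x :: pvRep c d t) = pvOcc c d (pvRep c d t) := by
        apply pv_occ_cons_of_neg
        rintro ⟨h1, h2⟩
        exact hcond ⟨h1, (pv_rep_take2 c d hc t).mp h2⟩
      have hR : pvOcc c d (x :: t) = pvOcc c d t := pv_occ_cons_of_neg c d x t hcond
      rw [hL, hR]
      exact ih

theorem pv_cnt_zero_iff (c d : Char) (l : List Char) :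
    pvCnt c d l = 0 ↔ pvOcc c d l = 0 := by
  induction l with
  | nil => simp [pvCnt, pvOcc]
  | cons x t ih =>
      rw [pvCnt]
      simp only [pvOcc]
      split
      · simp
      · simpa using ih

theorem pv_occ_le_len (c d : Char) (l : List Char) : pvOcc c d l ≤ l.length := by
  induction l with
  | nil => simp [pvOcc]
  | cons x t ih =>
      simp only [pvOcc, List.length_cons]
      split <;> omega

theorem pv_zw_fix (c d : Char) (l : List Char) (p : Bool)
    (h0 : pvOcc c d l = 0) (hp : p = true → ¬ (l.take 2 = [c, d])) :
    pvZw c d p l = l := by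
  induction l generalizing p with
  | nil => simp [pvZw]
  | cons x t ih =>
      have hocc : ¬ (x = ' ' ∧ t.take 2 = [c, d]) ∧ pvOcc c d t = 0 := by
        simp only [pvOcc] at h0
        constructor
        · intro hcond; rw [if_pos hcond] at h0; omega
        · omega
      rw [pvZw]
      rw [if_neg ?hcond]
      case hcond =>
        rintro ⟨hp', hxc, hhd⟩
        apply hp hp'
        simp [List.take_succ_cons, List.take_one, hhd, hxc]
      simp only [List.singleton_append, List.cons.injEq, true_and]
      apply ih _ hocc.2
      intro hx
      have hx' : x = ' ' := by simpa using hx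
      intro htake
      exact hocc.1 ⟨hx', htake⟩

theorem pv_zw_rep (c d : Char) (hc : c ≠ ' ') (hd : d ≠ '"') (l : List Char) (p : Bool) :
    pvZw c d p (pvRep c d l) = pvZw c d p l := by
  induction l using pvRep.induct c d generalizing p with
  | case1 => simp [pvRep]
  | case2 x t hcond ih =>
      obtain ⟨hx, ht2⟩ := hcond
      have ht := pv_take2_decomp ht2
      subst hx
      rw [pvRep, if_pos ⟨rfl, ht2⟩]
      conv_rhs => rw [ht]
      have hc1 : ¬ (' ' = c) := fun e => hc e.symm
      have hcf : (c == ' ') = false := by simp [hc]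
      have hqf : (('"' : Char) == ' ') = false := by decide
      have hsf : ((' ' : Char) == ' ') = true := by decide
      -- left side: five plain steps
      rw [pvZw, if_neg (by rintro ⟨-, h1, -⟩; exact hc1 h1), hsf]
      rw [pvZw, if_neg (by
        rintro ⟨-, h1, h2⟩
        simp only [List.head?_cons, Option.some.injEq] at h2
        exact hd (h2 ▸ h1).symm), hqf]
      rw [pvZw, if_neg (by rintro ⟨h, -⟩; simp at h), hcf]
      rw [pvZw, if_neg (by rintro ⟨h, -⟩; simp at h), hqf]
      rw [pvZw, if_neg (by rintro ⟨h, -⟩; simp at h)]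
      -- right side: three steps, middle one quotes
      rw [pvZw, if_neg (by rintro ⟨-, h1, -⟩; exact hc1 h1), hsf]
      rw [pvZw, if_pos ⟨rfl, rfl, by simp⟩, hcf]
      rw [pvZw, if_neg (by rintro ⟨h, -⟩; simp at h)]
      simp only [List.singleton_append, List.cons_append, List.nil_append, List.cons.injEq,
        true_and]
      exact ih _
  | case3 x t hcond ih =>
      rw [pvRep, if_neg hcond]
      conv_lhs => rw [pvZw]
      conv_rhs => rw [pvZw]
      rw [pv_rep_head]
      rw [ih]

theorem pv_loop_eq (c d : Char) (hc : c ≠ ' ') (hd : d ≠ '"') :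
    ∀ (fuel : Nat) (l : List Char), pvOcc c d l < fuel →
      pvSaveReplace fuel l [' ', c, d] [' ', '"', c, '"', d] = pvZw c d false l := by
  intro fuel
  induction fuel with
  | zero => intro l h; omega
  | succ n ih =>
      intro l h
      rw [pvSaveReplace]
      rw [pv_count_eq]
      by_cases hz : pvCnt c d l = 0
      · rw [if_neg (by omega)]
        exact (pv_zw_fix c d l false ((pv_cnt_zero_iff c d l).mp hz) (by simp)).symm
      · rw [if_pos (by omega)]
        rw [pv_replace_eq]
        have hlt : pvOcc c d (pvRep c d l) < n := by
          have h1 := pv_occ_rep c d hc hd l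
          rw [if_neg hz] at h1
          omega
        rw [ih _ hlt]
        exact pv_zw_rep c d hc hd l false

theorem pv_zw_head_false (c d : Char) (l : List Char) :
    (pvZw c d false l).head? = l.head? := by
  cases l with
  | nil => rfl
  | cons x t => rw [pvZw, if_neg (by rintro ⟨h, -⟩; simp at h)]; rfl

theorem pv_fuse (c : Char) (hc : c ≠ ' ') (l : List Char) (p : Bool) :
    pvZw c '\n' p (pvZw c ' ' p l) = pvQuoteScan c p l := by
  induction l generalizing p with
  | nil => simp [pvZw, pvQuoteScan]
  | cons x t ih =>
      by_cases h1 : p = true ∧ x = c ∧ t.head? = some ' '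
      · have hxs : (x == ' ') = false := by
          rw [h1.2.1]; simp [hc]
        rw [pvZw, if_pos h1, hxs]
        simp only [List.cons_append, List.nil_append]
        rw [pvZw, if_neg (by
          rintro ⟨-, hq, hh⟩
          simp only [List.head?_cons, Option.some.injEq] at hh
          rw [h1.2.1, ← hq] at hh
          exact (by decide : ('"' : Char) ≠ '\n') hh)]
        rw [(by decide : (('"' : Char) == ' ') = false)]
        rw [pvZw, if_neg (by rintro ⟨hf, -⟩; simp at hf), hxs]
        rw [pvZw, if_neg (by rintro ⟨hf, -⟩; simp at hf),
          (by decide : (('"' : Char) == ' ') = false)]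
        rw [pvQuoteScan, if_pos (by
          rw [h1.1, h1.2.1, h1.2.2]
          simp), hxs]
        simp only [List.cons_append, List.nil_append, List.cons.injEq, true_and]
        exact ih false
      · by_cases h2 : p = true ∧ x = c ∧ t.head? = some '\n'
        · have hxs : (x == ' ') = false := by
            rw [h2.2.1]; simp [hc]
          rw [pvZw, if_neg h1, hxs]
          simp only [List.singleton_append]
          rw [pvZw, if_pos (by
            refine ⟨h2.1, h2.2.1, ?_⟩
            rw [pv_zw_head_false]
            exact h2.2.2), hxs]
          rw [pvQuoteScan, if_pos (by
            rw [h2.1, h2.2.1, h2.2.2]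
            simp), hxs]
          simp only [List.cons_append, List.nil_append, List.cons.injEq, true_and]
          exact ih false
        · rw [pvZw, if_neg h1]
          simp only [List.singleton_append]
          rw [pvZw, if_neg (by
            rintro ⟨hp, hxc, hh⟩
            have hxs : (x == ' ') = false := by rw [hxc]; simp [hc]
            rw [hxs, pv_zw_head_false] at hh
            exact h2 ⟨hp, hxc, hh⟩)]
          rw [pvQuoteScan, if_neg (by
            intro hb
            simp only [Bool.and_eq_true, Bool.or_eq_true, beq_iff_eq] at hb
            obtain ⟨⟨hp, hxc⟩, hor⟩ := hb
            cases hor with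
            | inl h => exact h1 ⟨hp, hxc, h⟩
            | inr h => exact h2 ⟨hp, hxc, h⟩)]
          simp only [List.singleton_append, List.cons.injEq, true_and]
          exact ih (x == ' ')

theorem pv_prim_step (c : Char) (hc : c ≠ ' ') (g : List Char) :
    pvSaveReplace
        ((pvSaveReplace (g.length + 1) g [' ', c, ' '] [' ', '"', c, '"', ' ']).length + 1)
        (pvSaveReplace (g.length + 1) g [' ', c, ' '] [' ', '"', c, '"', ' '])
        [' ', c, '\n'] [' ', '"', c, '"', '\n']
      = pvQuoteScan c false g := by
  rw [pv_loop_eq c ' ' hc (by decide) _ g (Nat.lt_succ_of_le (pv_occ_le_len c ' ' g))]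
  rw [pv_loop_eq c '\n' hc (by decide) _ _
    (Nat.lt_succ_of_le (pv_occ_le_len c '\n' _))]
  exact pv_fuse c hc g false

theorem pv_prefix_eq (structure_ : List (String × List String)) :
    ((PySem.Dict.ofList structure_).items).foldl
      (fun acc p =>
        acc ++ p.1.toList ++ (" -> ".toList)
            ++ PySem.Chars.join (" | ".toList) (p.2.map String.toList) ++ ['\n']) []
    = PySem.Chars.join []
        (((PySem.Dict.ofList structure_).items).map
          (fun p => p.1.toList ++ (" -> ".toList)
              ++ PySem.Chars.join (" | ".toList) (p.2.map String.toList) ++ ['\n'])) := by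
  have hjoin : ∀ (xss : List (List Char)), PySem.Chars.join [] xss = xss.flatten := by
    intro xss
    induction xss with
    | nil => simp [PySem.Chars.join, List.intercalate]
    | cons y ys ih =>
        cases ys with
        | nil => simp [PySem.Chars.join, List.intercalate]
        | cons z zs =>
            simp only [PySem.Chars.join, List.intercalate] at ih ⊢
            simp_all [List.intersperse]
  have hfoldl : ∀ (xs : List (String × List String)) (acc : List Char),
      xs.foldl (fun acc p =>
          acc ++ p.1.toList ++ (" -> ".toList)
              ++ PySem.Chars.join (" | ".toList) (p.2.map String.toList) ++ ['\n']) acc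
        = acc ++ (xs.map (fun p => p.1.toList ++ (" -> ".toList)
              ++ PySem.Chars.join (" | ".toList) (p.2.map String.toList) ++ ['\n'])).flatten := by
    intro xs
    induction xs with
    | nil => intro acc; simp
    | cons y ys ih => intro acc; simp [ih, List.append_assoc]
  rw [hfoldl, hjoin, List.nil_append]

-- ===== VERDICT (by name: the statement is the Claim_ definition above) =====
theorem dict_structure_to_str_py_spec : Claim_equal_dict_structure_to_str_py := by
  intro structure_ primitives _hDom hPre
  have hPre' : ∀ c ∈ primitives.toList, c ≠ ' ' := by
    intro c hcmem
    have := List.all_eq_true.mp hPre c hcmem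
    simpa using this
  unfold Spec_dict_structure_to_str_py
  unfold dict_structure_to_str_py dict_structure_to_str_py_alt
  dsimp only
  rw [pv_prefix_eq]
  congr 1
  apply PySem.List.foldl_congr_mem
  intro acc x hx
  exact pv_prim_step x (hPre' x hx) acc
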